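-- pv_equiv track=rewrite | github.com/rockbeenorth/colorize | render_previews/generate_preview.py | divs_sum_recursive
-- ===== SOURCE A (Python) =====
-- def divs_sum_recursive(input_list):
--     # Base case
--     if input_list == []:
--         return ""
--
--     # Recursive case
--     # Decompose the original problem into simpler instances of the same problem
--     # by making use of the fact that the input is a recursive data structure
--     # and can be deﬁned in terms of a smaller version of itself
--     else:
--         head = input_list[0]
--         smaller_list = input_list[1:]
--         string = f'<div class="{head} temp_demo_stand_class"><code class="small-paragraph">Class: {head}</code>{divs_sum_recursive(smaller_list)}</div>'
--         return string
-- ===== SOURCE B (Python) =====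
-- def divs_sum_recursive(input_list):
--     # Iterative: wrap from the tail to the head, no recursion, no list slicing.
--     result = ""
--     for head in reversed(input_list):
--         result = f'<div class="{head} temp_demo_stand_class"><code class="small-paragraph">Class: {head}</code>{result}</div>'
--     return result
-- ===== Notes on version B (the rewrite author's own statement) =====
-- stated objective: faster
-- what changed: Replaces the recursive decomposition with repeated O(n) list slicing by a single iterative pass over the reversed list that wraps an accumulator string, removing the quadratic slice cost and recursion-depth limit.
import Mathlib
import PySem

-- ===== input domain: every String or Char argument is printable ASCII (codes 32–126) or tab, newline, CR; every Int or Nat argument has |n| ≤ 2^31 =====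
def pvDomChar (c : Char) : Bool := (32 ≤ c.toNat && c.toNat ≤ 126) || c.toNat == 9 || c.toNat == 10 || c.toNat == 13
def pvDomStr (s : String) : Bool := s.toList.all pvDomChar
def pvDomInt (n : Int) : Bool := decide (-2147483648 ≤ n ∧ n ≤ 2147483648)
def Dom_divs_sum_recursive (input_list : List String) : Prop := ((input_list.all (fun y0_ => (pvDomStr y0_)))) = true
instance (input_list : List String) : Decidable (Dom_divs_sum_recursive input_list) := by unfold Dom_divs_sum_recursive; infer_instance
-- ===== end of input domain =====

-- B replaces A's recursion with O(n^2) slicing by one iterative pass over the reversed list (faster, asymptotically).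

-- ===== PORT A =====
-- literal port of A: recursion on the list, wrapping the recursive result of the tail
def divs_sum_recursive : List String → String
  | [] => ""
  | head :: smaller_list =>
      "<div class=\"" ++ head ++ " temp_demo_stand_class\"><code class=\"small-paragraph\">Class: "
        ++ head ++ "</code>" ++ divs_sum_recursive smaller_list ++ "</div>"

-- ===== PORT B =====
-- one wrapping step of B's loop body
def pvWrap (head acc : String) : String :=
  "<div class=\"" ++ head ++ " temp_demo_stand_class\"><code class=\"small-paragraph\">Class: "
    ++ head ++ "</code>" ++ acc ++ "</div>"

-- literal port of B: fold over the reversed list with a string accumulator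
def divs_sum_recursive_alt (input_list : List String) : String :=
  input_list.reverse.foldl (fun result head => pvWrap head result) ""

-- ===== PRECONDITION & SPEC =====
def Spec_divs_sum_recursive (input_list : List String) (out : String) : Prop := out = divs_sum_recursive_alt input_list
instance (input_list : List String) (out : String) : Decidable (Spec_divs_sum_recursive input_list out) := by unfold Spec_divs_sum_recursive; infer_instance

-- ===== CLAIM (what is proved, stated in full; the proofs are below) =====
def Claim_equal_divs_sum_recursive : Prop := ∀ (input_list : List String), Dom_divs_sum_recursive input_list → Spec_divs_sum_recursive input_list (divs_sum_recursive input_list)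

-- ===== LEMMAS AND PROOFS =====
theorem pv_eq (input_list : List String) : divs_sum_recursive_alt input_list = divs_sum_recursive input_list := by
  induction input_list with
  | nil => rfl
  | cons h t ih =>
      unfold divs_sum_recursive_alt at *
      rw [List.reverse_cons, List.foldl_append, List.foldl_cons, List.foldl_nil, ih]
      rfl

-- ===== VERDICT (by name: the statement is the Claim_ definition above) =====
theorem divs_sum_recursive_spec : Claim_equal_divs_sum_recursive := by
  intro l _; exact (pv_eq l).symm
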